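-- pv_equiv track=rewrite | github.com/miliar/Code_Jam_Webscraper | solutions_python/solutions_year15_round0_nr1/3181.py | friends_needed
-- ===== SOURCE A (Python) =====
-- def friends_needed(max_level, nums):
--   if len(nums) == 1:
--     return 0
--   needed = 0
--   count = 0
--   for shyness, num in enumerate(nums):
--     if shyness > count and num > 0:
--       needed += shyness - count
--       count += shyness - count
--     count += num
--   return needed
-- ===== SOURCE B (Python) =====
-- def friends_needed(max_level, nums):
--     # exclusive prefix sums: prefix[i] = sum(nums[:i])
--     prefix = []
--     s = 0
--     for x in nums:
--         prefix.append(s)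
--         s += x
--     # answer = max(0, max over i with nums[i]>0 of (i - prefix[i]))
--     best = 0
--     i = 0
--     for x, p in zip(nums, prefix):
--         if x > 0 and i - p > best:
--             best = i - p
--         i += 1
--     return best
-- ===== Notes on version B (the rewrite author's own statement) =====
-- stated objective: alternative
-- what changed: Replaces A's greedy loop that folds added friends back into a running audience count with a two-pass computation: build the exclusive prefix-sum table of nums, then take max(0, max of i - prefix[i] over indices with nums[i] > 0).
import Mathlib
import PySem

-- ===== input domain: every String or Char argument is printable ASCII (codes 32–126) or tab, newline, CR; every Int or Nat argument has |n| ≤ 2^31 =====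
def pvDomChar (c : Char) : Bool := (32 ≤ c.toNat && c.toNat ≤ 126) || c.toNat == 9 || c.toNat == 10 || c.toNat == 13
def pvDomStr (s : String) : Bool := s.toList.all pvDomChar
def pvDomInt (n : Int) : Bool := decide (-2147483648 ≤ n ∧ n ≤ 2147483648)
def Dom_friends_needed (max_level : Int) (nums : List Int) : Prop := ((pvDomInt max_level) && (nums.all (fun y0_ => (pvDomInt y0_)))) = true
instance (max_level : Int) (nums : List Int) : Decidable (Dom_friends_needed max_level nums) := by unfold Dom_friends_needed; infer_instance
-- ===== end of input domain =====

-- B replaces A's greedy fold (added friends merged into a running audience count) by an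
-- exclusive prefix-sum table plus a separate max-scan of i - prefix[i]; alternative, same cost.

-- ===== PORT A =====
def friends_needed (max_level : Int) (nums : List Int) : Int :=
  if nums.length = 1 then 0
  else
    ((PySem.List.enumerate nums).foldl
      (fun (st : Int × Int) p =>
        let st' := if p.1 > st.2 ∧ p.2 > 0 then (st.1 + (p.1 - st.2), st.2 + (p.1 - st.2)) else st
        (st'.1, st'.2 + p.2)) ((0 : Int), (0 : Int))).1

-- ===== PORT B =====
def friends_needed_alt (max_level : Int) (nums : List Int) : Int :=
  -- first pass: exclusive prefix sums
  let pr := (nums.foldl (fun (a : List Int × Int) x => (a.1 ++ [a.2], a.2 + x)) (([] : List Int), (0 : Int))).1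
  -- second pass: max of i - prefix[i] over positive entries, floored at 0
  ((nums.zip pr).foldl
    (fun (acc : Int × Int) xp =>
      (if xp.1 > 0 ∧ acc.2 - xp.2 > acc.1 then acc.2 - xp.2 else acc.1, acc.2 + 1))
    ((0 : Int), (0 : Int))).1

-- ===== PRECONDITION & SPEC =====
def Spec_friends_needed (max_level : Int) (nums : List Int) (out : Int) : Prop := out = friends_needed_alt max_level nums
instance (max_level : Int) (nums : List Int) (out : Int) : Decidable (Spec_friends_needed max_level nums out) := by unfold Spec_friends_needed; infer_instance

-- ===== CLAIM (what is proved, stated in full; the proofs are below) =====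
def Claim_equal_friends_needed : Prop := ∀ (max_level : Int) (nums : List Int), Dom_friends_needed max_level nums → Spec_friends_needed max_level nums (friends_needed max_level nums)

-- ===== LEMMAS AND PROOFS =====

/-- Reference recursion both ports are reduced to: running max `b` of `i - S`
over positive entries, where `i` is the index and `S` the exclusive prefix sum. -/
def pvRef (l : List Int) (i S b : Int) : Int :=
  match l with
  | [] => b
  | x :: xs => pvRef xs (i + 1) (S + x) (if x > 0 ∧ i - S > b then i - S else b)

/-- Exclusive prefix sums, structurally. -/
def pvPre (l : List Int) (s : Int) : List Int :=
  match l with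
  | [] => []
  | x :: xs => s :: pvPre xs (s + x)

lemma pvPre_build (l : List Int) (acc : List Int) (s : Int) :
    l.foldl (fun (a : List Int × Int) x => (a.1 ++ [a.2], a.2 + x)) (acc, s)
      = (acc ++ pvPre l s, s + l.sum) := by
  induction l generalizing acc s with
  | nil => simp [pvPre]
  | cons x xs ih =>
    simp only [List.foldl_cons, ih, pvPre, List.sum_cons, Prod.mk.injEq]
    constructor
    · simp
    · ring

lemma lemA (l : List Int) (i S n : Int) :
    ((PySem.List.enumerate l i).foldl
      (fun (st : Int × Int) p =>
        let st' := if p.1 > st.2 ∧ p.2 > 0 then (st.1 + (p.1 - st.2), st.2 + (p.1 - st.2)) else st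
        (st'.1, st'.2 + p.2)) (n, S + n)).1 = pvRef l i S n := by
  induction l generalizing i S n with
  | nil => simp [pvRef]
  | cons x xs ih =>
    rw [PySem.List.enumerate_cons, List.foldl_cons]
    by_cases hcond : i > S + n ∧ x > 0
    · have e : ((if i > S + n ∧ x > 0 then
            (n + (i - (S + n)), S + n + (i - (S + n))) else (n, S + n)).1,
          (if i > S + n ∧ x > 0 then
            (n + (i - (S + n)), S + n + (i - (S + n))) else (n, S + n)).2 + x)
          = (i - S, (S + x) + (i - S)) := by
        rw [if_pos hcond]
        simp only [Prod.mk.injEq]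
        constructor <;> omega
      rw [e, ih]
      have h2 : x > 0 ∧ i - S > n := ⟨hcond.2, by omega⟩
      simp [pvRef, h2]
    · have e : ((if i > S + n ∧ x > 0 then
            (n + (i - (S + n)), S + n + (i - (S + n))) else (n, S + n)).1,
          (if i > S + n ∧ x > 0 then
            (n + (i - (S + n)), S + n + (i - (S + n))) else (n, S + n)).2 + x)
          = (n, (S + x) + n) := by
        rw [if_neg hcond]
        simp only [Prod.mk.injEq]
        exact ⟨trivial, by ring⟩
      rw [e, ih]
      have h2 : ¬ (x > 0 ∧ i - S > n) := by
        intro h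
        exact hcond ⟨by omega, h.1⟩
      simp [pvRef, h2]

lemma lemB (l : List Int) (S b i : Int) :
    ((l.zip (pvPre l S)).foldl
      (fun (acc : Int × Int) xp =>
        (if xp.1 > 0 ∧ acc.2 - xp.2 > acc.1 then acc.2 - xp.2 else acc.1, acc.2 + 1)) (b, i)).1
      = pvRef l i S b := by
  induction l generalizing S b i with
  | nil => simp [pvRef]
  | cons x xs ih =>
    simp only [pvPre, List.zip_cons_cons, List.foldl_cons]
    rw [ih]
    simp [pvRef]

lemma alt_eq_ref (max_level : Int) (nums : List Int) :
    friends_needed_alt max_level nums = pvRef nums 0 0 0 := by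
  unfold friends_needed_alt
  rw [pvPre_build]
  simpa using lemB nums 0 0 0

-- ===== VERDICT (by name: the statement is the Claim_ definition above) =====
theorem friends_needed_spec : Claim_equal_friends_needed := by
  intro max_level nums _
  unfold Spec_friends_needed
  rw [alt_eq_ref]
  unfold friends_needed
  by_cases h : nums.length = 1
  · rw [if_pos h]
    match nums, h with
    | [x], _ =>
      simp only [pvRef]
      simp
  · rw [if_neg h]
    simpa using lemA nums 0 0 0
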